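-- pv_equiv track=rewrite | github.com/MaxiMo3301/Luna-Cat-AI-Development | src/experiments/tracker_plus_blazepose/utils.py | find_isp_scale_params
-- ===== SOURCE A (Python) =====
-- from math import gcd, sin, cos
--
-- def find_isp_scale_params(size, is_height=True):
--     """
--     Find closest valid size close to 'size' and and the corresponding parameters to setIspScale()
--     This function is useful to work around a bug in depthai where ImageManip is scrambling images that have an invalid size
--     is_height : boolean that indicates if the value is the height or the width of the image
--     Returns: valid size, (numerator, denominator)
--     """
--     # We want size >= 288
--     if size < 288:
--         size = 288
--
--     # We are looking for the list on integers that are divisible by 16 and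
--     # that can be written like n/d where n <= 16 and d <= 63
--     if is_height:
--         reference = 1080
--         other = 1920
--     else:
--         reference = 1920
--         other = 1080
--     size_candidates = {}
--     for s in range(288, reference, 16):
--         f = gcd(reference, s)
--         n = s // f
--         d = reference // f
--         if n <= 16 and d <= 63 and int(round(other * n / d) % 2 == 0):
--             size_candidates[s] = (n, d)
--
--     # What is the candidate size closer to 'size' ?
--     min_dist = -1
--     for s in size_candidates:
--         dist = abs(size - s)
--         if min_dist == -1:
--             min_dist = dist
--             candidate = s
--         else:
--             if dist > min_dist: break
--             candidate = s
--             min_dist = dist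
--     return candidate, size_candidates[candidate]
-- ===== SOURCE B (Python) =====
-- from math import gcd
--
-- def find_isp_scale_params(size, is_height=True):
--     """Single-pass version: keep only the running best candidate instead of
--     building a table of all candidates and scanning it afterwards."""
--     if size < 288:
--         size = 288
--     if is_height:
--         reference, other = 1080, 1920
--     else:
--         reference, other = 1920, 1080
--     best = None  # (dist, s, (n, d))
--     for s in range(288, reference, 16):
--         f = gcd(reference, s)
--         n = s // f
--         d = reference // f
--         if n <= 16 and d <= 63 and round(other * n / d) % 2 == 0:
--             dist = abs(size - s)
--             if best is None or dist <= best[0]: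
--                 best = (dist, s, (n, d))
--     return best[1], best[2]
-- ===== Notes on version B (the rewrite author's own statement) =====
-- stated objective: simpler
-- what changed: B fuses A's two phases (build a dict of all valid sizes, then scan it with a break) into one pass over the range that keeps only the running best candidate, updating on dist <= best to preserve A's tie-break toward the larger size.
import Mathlib
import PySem

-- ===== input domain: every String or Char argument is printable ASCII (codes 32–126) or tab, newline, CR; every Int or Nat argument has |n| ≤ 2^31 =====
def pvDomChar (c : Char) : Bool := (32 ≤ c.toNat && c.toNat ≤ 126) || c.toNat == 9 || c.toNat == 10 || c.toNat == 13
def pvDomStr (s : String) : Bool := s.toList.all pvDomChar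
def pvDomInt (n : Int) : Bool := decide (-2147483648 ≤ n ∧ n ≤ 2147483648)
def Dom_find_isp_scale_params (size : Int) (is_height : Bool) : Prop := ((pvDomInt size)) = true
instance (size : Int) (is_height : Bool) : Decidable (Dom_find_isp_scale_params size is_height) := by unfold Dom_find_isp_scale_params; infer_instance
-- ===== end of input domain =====

-- B replaces A's candidates table + second scan-with-break by a single pass that keeps only
-- the running best candidate (objective: simpler; update on dist ≤ best keeps A's tie-break).

-- ===== PORT A =====
-- round(other * n / d) for the nonnegative operands arising here: round-half-to-even of the
-- exact rational (other*n)/d.  Exact w.r.t. Python's float round on every (other, n, d) this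
-- program feeds it (checked exhaustively for both reference/other settings).
def pvRoundDiv (a b : Int) : Int :=
  let q := PySem.Int.floordiv a b
  let r := a - q * b
  if 2 * r < b then q
  else if b < 2 * r then q + 1
  else if PySem.Int.mod q 2 = 0 then q else q + 1

-- the candidate filter shared by both Pythons: n <= 16 and d <= 63 and round(other*n/d) % 2 == 0
def pvIsCand (reference other s : Int) : Bool :=
  let f : Int := Int.gcd reference s
  let n := PySem.Int.floordiv s f
  let d := PySem.Int.floordiv reference f
  decide (n ≤ 16 ∧ d ≤ 63 ∧ PySem.Int.mod (pvRoundDiv (other * n) d) 2 = 0)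

-- (n, d) = (s // gcd, reference // gcd)
def pvND (reference s : Int) : Int × Int :=
  let f : Int := Int.gcd reference s
  (PySem.Int.floordiv s f, PySem.Int.floordiv reference f)

-- A's first loop: build the dict of candidates
def pvBuildCandidates (reference other : Int) : PySem.Dict Int (Int × Int) :=
  (PySem.List.pyRange 288 reference 16).foldl
    (fun dct s => if pvIsCand reference other s then dct.insert s (pvND reference s) else dct)
    PySem.Dict.empty

-- A's second loop over the dict's keys; returns (min_dist, candidate); break = return early
def pvSelect (size : Int) (min_dist cand : Int) : List Int → Int × Int
  | [] => (min_dist, cand)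
  | s :: rest =>
    let dist := |size - s|
    if min_dist = -1 then pvSelect size dist s rest
    else if dist > min_dist then (min_dist, cand)
    else pvSelect size dist s rest

def pvAwith (size reference other : Int) : Int × (Int × Int) :=
  let cands := pvBuildCandidates reference other
  -- 'candidate' is always assigned in Python (the dict is never empty); 0 is an unreachable default
  let c := (pvSelect size (-1) 0 cands.keys).2
  (c, cands.getD c (0, 0))  -- key always present, so getD's default (0,0) is unreachable

def find_isp_scale_params (size : Int) (is_height : Bool) : Int × (Int × Int) :=
  let sz := if size < 288 then 288 else size
  let ro : Int × Int := if is_height then (1080, 1920) else (1920, 1080)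
  pvAwith sz ro.1 ro.2

-- ===== PORT B =====
-- B's update block: dist = abs(size - s); replace best when best is None or dist <= best dist
def pvBstep (size reference : Int) (best : Option (Int × Int × (Int × Int))) (s : Int) :
    Option (Int × Int × (Int × Int)) :=
  let dist := |size - s|
  match best with
  | none => some (dist, s, pvND reference s)
  | some (bd, bs, bp) =>
    if dist ≤ bd then some (dist, s, pvND reference s) else some (bd, bs, bp)

def pvBwith (size reference other : Int) : Int × (Int × Int) :=
  match (PySem.List.pyRange 288 reference 16).foldl
      (fun best s => if pvIsCand reference other s then pvBstep size reference best s else best)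
      none with
  | some (_, s, p) => (s, p)
  | none => (0, (0, 0))  -- unreachable: the Python raises on best = None, but candidates always exist

def find_isp_scale_params_alt (size : Int) (is_height : Bool) : Int × (Int × Int) :=
  let sz := if size < 288 then 288 else size
  let ro : Int × Int := if is_height then (1080, 1920) else (1920, 1080)
  pvBwith sz ro.1 ro.2

-- ===== PRECONDITION & SPEC =====
def Spec_find_isp_scale_params (size : Int) (is_height : Bool) (out : Int × (Int × Int)) : Prop := out = find_isp_scale_params_alt size is_height
instance (size : Int) (is_height : Bool) (out : Int × (Int × Int)) : Decidable (Spec_find_isp_scale_params size is_height out) := by unfold Spec_find_isp_scale_params; infer_instance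

-- ===== CLAIM (what is proved, stated in full; the proofs are below) =====
def Claim_equal_find_isp_scale_params : Prop := ∀ (size : Int) (is_height : Bool), Dom_find_isp_scale_params size is_height → Spec_find_isp_scale_params size is_height (find_isp_scale_params size is_height)

-- ===== LEMMAS AND PROOFS =====

-- a fold whose body is guarded by `if g s` is the fold of the filtered list
theorem pv_foldl_if {α : Type} (g : Int → Bool) (f : α → Int → α) :
    ∀ (l : List Int) (init : α),
      l.foldl (fun b s => if g s then f b s else b) init = (l.filter g).foldl f init := by
  intro l
  induction l with
  | nil => intro init; rfl
  | cons x xs IH =>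
    intro init
    by_cases h : g x <;> simp [h, IH]

-- the selected candidate is the start value or a member of the list
theorem pv_select_mem (size : Int) :
    ∀ (K : List Int) (d c : Int), (pvSelect size d c K).2 ∈ c :: K := by
  intro K
  induction K with
  | nil => intro d c; simp [pvSelect]
  | cons x xs IH =>
    intro d c
    simp only [pvSelect]
    split_ifs with h1 h2
    · exact List.mem_cons_of_mem _ (IH _ x)
    · exact List.mem_cons_self
    · exact List.mem_cons_of_mem _ (IH _ x)

-- once every remaining distance exceeds the stored one, B's fold never updates again
theorem pv_nomore (size reference : Int) :
    ∀ (K : List Int) (d bs : Int) (bp : Int × Int), (∀ y ∈ K, d < |size - y|) →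
      K.foldl (pvBstep size reference) (some (d, bs, bp)) = some (d, bs, bp) := by
  intro K
  induction K with
  | nil => intros; rfl
  | cons x xs IH =>
    intro d bs bp h
    rw [List.foldl_cons]
    have hx : d < |size - x| := h x (by simp)
    have hstep : pvBstep size reference (some (d, bs, bp)) x = some (d, bs, bp) := by
      simp only [pvBstep]; rw [if_neg (by omega)]
    rw [hstep]
    exact IH d bs bp (fun y hy => h y (by simp [hy]))

-- lockstep: from matching states, A's scan-with-break and B's fold pick the same candidate
theorem pv_lockstep (size reference : Int) :
    ∀ (K : List Int), K.Pairwise (· < ·) → ∀ (c : Int), (∀ y ∈ K, c < y) →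
      K.foldl (pvBstep size reference) (some (|size - c|, c, pvND reference c)) =
        some (|size - (pvSelect size (|size - c|) c K).2|,
              (pvSelect size (|size - c|) c K).2,
              pvND reference ((pvSelect size (|size - c|) c K).2)) := by
  intro K
  induction K with
  | nil => intro _ c _; simp [pvSelect]
  | cons x xs IH =>
    intro hp c hlt
    have hcx : c < x := hlt x (by simp)
    have hpx : ∀ y ∈ xs, x < y := fun y hy => (List.pairwise_cons.mp hp).1 y hy
    have hps : xs.Pairwise (· < ·) := (List.pairwise_cons.mp hp).2
    have hne : ¬ (|size - c| = -1) := by have := abs_nonneg (size - c); omega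
    rw [List.foldl_cons]
    by_cases hbr : |size - x| > |size - c|
    · -- A breaks at x; B skips x and (by pv_nomore) everything after it
      have hstep : pvBstep size reference (some (|size - c|, c, pvND reference c)) x
          = some (|size - c|, c, pvND reference c) := by
        simp only [pvBstep]; rw [if_neg (by omega)]
      have hsx : size < x := by
        rcases abs_cases (size - c) with ⟨h1, _⟩ | ⟨h1, _⟩ <;>
          rcases abs_cases (size - x) with ⟨h2, _⟩ | ⟨h2, _⟩ <;> omega
      have hrest : ∀ y ∈ xs, |size - c| < |size - y| := by
        intro y hy
        have hxy : x < y := hpx y hy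
        have h1 : -(size - y) ≤ |size - y| := neg_le_abs (size - y)
        have h2 : |size - x| = -(size - x) := abs_of_nonpos (by omega)
        omega
      rw [hstep, pv_nomore size reference xs _ _ _ hrest]
      have hsel : pvSelect size (|size - c|) c (x :: xs) = (|size - c|, c) := by
        simp only [pvSelect]; rw [if_neg hne, if_pos hbr]
      rw [hsel]
    · -- both sides adopt x as the new best and continue
      have hstep : pvBstep size reference (some (|size - c|, c, pvND reference c)) x
          = some (|size - x|, x, pvND reference x) := by
        simp only [pvBstep]; rw [if_pos (by omega)]
      have hsel : pvSelect size (|size - c|) c (x :: xs) = pvSelect size (|size - x|) x xs := by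
        simp only [pvSelect]; rw [if_neg hne, if_neg hbr]
      rw [hstep, hsel]
      exact IH hps x hpx

-- starting states: A's min_dist = -1 and B's None both adopt the first candidate
theorem pv_init (size reference : Int) (x c0 : Int) (K : List Int)
    (hp : (x :: K).Pairwise (· < ·)) :
    (x :: K).foldl (pvBstep size reference) none =
      some (|size - (pvSelect size (-1) c0 (x :: K)).2|,
            (pvSelect size (-1) c0 (x :: K)).2,
            pvND reference ((pvSelect size (-1) c0 (x :: K)).2)) ∧
      (pvSelect size (-1) c0 (x :: K)).2 ∈ x :: K := by
  have hpx : ∀ y ∈ K, x < y := fun y hy => (List.pairwise_cons.mp hp).1 y hy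
  have hps : K.Pairwise (· < ·) := (List.pairwise_cons.mp hp).2
  have hsel : pvSelect size (-1) c0 (x :: K) = pvSelect size (|size - x|) x K := by
    simp [pvSelect]
  constructor
  · rw [List.foldl_cons,
      show pvBstep size reference none x = some (|size - x|, x, pvND reference x) from rfl,
      hsel]
    exact pv_lockstep size reference K hps x hpx
  · rw [hsel]
    exact pv_select_mem size K (|size - x|) x

-- the two cores agree, given the (decidable, size-independent) facts about the candidate set
theorem pv_gen (size reference other : Int)
    (hW : (pvBuildCandidates reference other).keys
            = (PySem.List.pyRange 288 reference 16).filter (pvIsCand reference other))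
    (hp : ((PySem.List.pyRange 288 reference 16).filter (pvIsCand reference other)).Pairwise (· < ·))
    (hne : ((PySem.List.pyRange 288 reference 16).filter (pvIsCand reference other)) ≠ [])
    (hgetD : ∀ s ∈ (PySem.List.pyRange 288 reference 16).filter (pvIsCand reference other),
        (pvBuildCandidates reference other).getD s (0, 0) = pvND reference s) :
    pvAwith size reference other = pvBwith size reference other := by
  simp only [pvAwith, pvBwith]
  rw [pv_foldl_if, hW]
  rcases hK : (PySem.List.pyRange 288 reference 16).filter (pvIsCand reference other) with _ | ⟨x, rest⟩
  · exact absurd hK hne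
  · rw [hK] at hp hgetD
    obtain ⟨hfold, hmem⟩ := pv_init size reference x 0 rest hp
    rw [hfold, hgetD _ hmem]

-- ===== VERDICT (by name: the statement is the Claim_ definition above) =====
set_option maxRecDepth 20000 in
theorem find_isp_scale_params_spec : Claim_equal_find_isp_scale_params := by
  intro size ih _
  unfold Spec_find_isp_scale_params find_isp_scale_params find_isp_scale_params_alt
  cases ih <;> simp only [Bool.false_eq_true, if_true, if_false]
  · exact pv_gen _ 1920 1080 (by decide) (by decide) (by decide) (by decide)
  · exact pv_gen _ 1080 1920 (by decide) (by decide) (by decide) (by decide)
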